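-- pv_equiv track=rewrite | github.com/SimSeoWon/AgentTest | mcp/crash_analyzer/server.py | _extract_callstack_from_log
-- ===== SOURCE A (Python) =====
-- def _extract_callstack_from_log(log_content: str) -> list[str]:
--     """로그에서 크래시 직전 콜스택 추출"""
--     lines = log_content.splitlines()
--     callstack = []
--     in_callstack = False
--
--     for line in lines:
--         if any(kw in line for kw in ("Assertion failed", "Fatal error", "=== Critical error ===")):
--             in_callstack = True
--         if in_callstack:
--             callstack.append(line)
--         if in_callstack and len(callstack) > 80:
--             break
--
--     return callstack
-- ===== SOURCE B (Python) =====
-- def _extract_callstack_from_log(log_content: str) -> list[str]: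
--     """로그에서 크래시 직전 콜스택 추출"""
--     lines = log_content.splitlines()
--     for i, line in enumerate(lines):
--         if ("Assertion failed" in line
--                 or "Fatal error" in line
--                 or "=== Critical error ===" in line):
--             return lines[i:i + 81]
--     return []
-- ===== Notes on version B (the rewrite author's own statement) =====
-- stated objective: simpler
-- what changed: Replaces the stateful in_callstack flag + append/break accumulator loop by a locate-then-slice decomposition: find the first trigger line and return lines[i:i+81].
import Mathlib
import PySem

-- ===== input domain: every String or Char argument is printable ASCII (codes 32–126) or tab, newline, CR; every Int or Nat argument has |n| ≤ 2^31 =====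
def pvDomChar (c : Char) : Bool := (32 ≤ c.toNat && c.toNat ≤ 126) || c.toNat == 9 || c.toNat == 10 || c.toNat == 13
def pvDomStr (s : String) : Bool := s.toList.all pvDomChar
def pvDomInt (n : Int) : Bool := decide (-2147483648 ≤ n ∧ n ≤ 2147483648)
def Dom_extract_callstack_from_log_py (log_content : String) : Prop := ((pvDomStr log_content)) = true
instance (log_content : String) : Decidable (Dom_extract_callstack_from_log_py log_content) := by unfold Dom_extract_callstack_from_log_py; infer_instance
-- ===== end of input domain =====

-- B replaces A's stateful flag + append/break loop by locate-then-slice (simpler decomposition, same cost).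

-- ===== PORT A =====
-- any(kw in line for kw in (...))
def pvTrigA (line : String) : Bool :=
  ["Assertion failed", "Fatal error", "=== Critical error ==="].any
    (fun kw => PySem.Str.isIn kw line)

-- the for-loop with state (callstack, in_callstack) and the break
def pvLoopA : List String → List String → Bool → List String
  | [], cs, _ => cs
  | l :: rest, cs, inc =>
    let inc' := if pvTrigA l then true else inc
    let cs' := if inc' then cs ++ [l] else cs
    if inc' && decide (cs'.length > 80) then cs'
    else pvLoopA rest cs' inc'

def extract_callstack_from_log_py (log_content : String) : List String :=
  pvLoopA (PySem.Str.splitlines log_content) [] false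

-- ===== PORT B =====
def pvTrigB (line : String) : Bool :=
  PySem.Str.isIn "Assertion failed" line
    || PySem.Str.isIn "Fatal error" line
    || PySem.Str.isIn "=== Critical error ===" line

-- the enumerate scan: index of the first trigger line
def pvScanB : List String → Nat → Option Nat
  | [], _ => none
  | l :: rest, i => if pvTrigB l then some i else pvScanB rest (i + 1)

def extract_callstack_from_log_py_alt (log_content : String) : List String :=
  match pvScanB (PySem.Str.splitlines log_content) 0 with
  | some i =>
      PySem.List.slice (PySem.Str.splitlines log_content)
        (some (i : Int)) (some ((i : Int) + ((81 : Nat) : Int)))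
  | none => []

-- ===== PRECONDITION & SPEC =====
def Spec_extract_callstack_from_log_py (log_content : String) (out : List String) : Prop := out = extract_callstack_from_log_py_alt log_content
instance (log_content : String) (out : List String) : Decidable (Spec_extract_callstack_from_log_py log_content out) := by unfold Spec_extract_callstack_from_log_py; infer_instance

-- ===== CLAIM (what is proved, stated in full; the proofs are below) =====
def Claim_equal_extract_callstack_from_log_py : Prop := ∀ (log_content : String), Dom_extract_callstack_from_log_py log_content → Spec_extract_callstack_from_log_py log_content (extract_callstack_from_log_py log_content)

-- ===== LEMMAS AND PROOFS =====

theorem pvTrig_eq (l : String) : pvTrigA l = pvTrigB l := by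
  simp [pvTrigA, pvTrigB, List.any, Bool.or_assoc]

theorem pvScanB_shift (xs : List String) (s : Nat) :
    pvScanB xs s = (pvScanB xs 0).map (· + s) := by
  induction xs generalizing s with
  | nil => simp [pvScanB]
  | cons l rest ih =>
    by_cases h : pvTrigB l = true
    · simp [pvScanB, h]
    · simp only [pvScanB, if_neg h]
      rw [ih (s + 1), ih 1, Option.map_map]
      cases pvScanB rest 0 with
      | none => simp
      | some v => simp; omega

-- once in_callstack is set, A appends until 81 lines are collected
theorem pvLoopA_phase2 (rest : List String) (cs : List String) (hcs : cs.length ≤ 80) :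
    pvLoopA rest cs true = cs ++ rest.take (81 - cs.length) := by
  induction rest generalizing cs with
  | nil => simp [pvLoopA]
  | cons l r ih =>
    simp only [pvLoopA, ite_self, if_true, Bool.true_and, decide_eq_true_eq]
    by_cases h : (cs ++ [l]).length > 80
    · have h80 : cs.length = 80 := by simp at h; omega
      rw [if_pos h]
      simp [h80]
    · rw [if_neg h]
      have hlen : cs.length ≤ 79 := by simp at h; omega
      rw [ih (cs ++ [l]) (by simp only [List.length_append, List.length_cons, List.length_nil]; omega)]
      have h1 : 81 - (cs ++ [l]).length = 80 - cs.length := by simp only [List.length_append, List.length_cons, List.length_nil]; omega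
      have h2 : 81 - cs.length = (80 - cs.length) + 1 := by omega
      rw [h1, h2]
      simp

theorem pvLoopA_eq_scan (lines : List String) :
    pvLoopA lines [] false =
      (match pvScanB lines 0 with
       | some i => (lines.drop i).take 81
       | none => []) := by
  induction lines with
  | nil => simp [pvLoopA, pvScanB]
  | cons l rest ih =>
    by_cases h : pvTrigB l = true
    · have ha : pvTrigA l = true := by rw [pvTrig_eq]; exact h
      simp only [pvLoopA, pvScanB, ha, h, if_true, List.nil_append]
      rw [if_neg (by simp)]
      rw [pvLoopA_phase2 rest [l] (by simp)]
      simp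
    · have ha : pvTrigA l = false := by rw [pvTrig_eq]; simpa using h
      rw [show pvLoopA (l :: rest) [] false = pvLoopA rest [] false by simp [pvLoopA, ha]]
      rw [show pvScanB (l :: rest) 0 = pvScanB rest 1 by simp [pvScanB, h]]
      rw [ih, pvScanB_shift rest 1]
      cases pvScanB rest 0 <;> simp

-- ===== VERDICT (by name: the statement is the Claim_ definition above) =====
theorem extract_callstack_from_log_py_spec : Claim_equal_extract_callstack_from_log_py := by
  intro log _
  unfold Spec_extract_callstack_from_log_py extract_callstack_from_log_py extract_callstack_from_log_py_alt
  rw [pvLoopA_eq_scan]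
  cases hscan : pvScanB (PySem.Str.splitlines log) 0 with
  | none => rfl
  | some i =>
    dsimp only
    rw [PySem.List.slice_natCast_add]
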